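-- pv_equiv track=rewrite | github.com/Momilijaz96/LeetCode | Strings/LongestCommonPrefix.py | CompareFirst
-- ===== SOURCE A (Python) =====
-- def CompareFirst(strs, loc):
--     count={}
--     index={}
--     for si,s in enumerate(strs):
--         if len(s)>loc:
--             if s[loc] in count:
--                 count[s[loc]]+=1
--                 index[s[loc]].append(si)
--             else:
--                 count[s[loc]]=1
--                 index[s[loc]]=[si]
--         else:
--             return [],''
--     s=strs[0][loc]
--     if count[s]==len(strs):
--         return index[s],s
--     else:
--         return [],''
-- ===== SOURCE B (Python) =====
-- def CompareFirst(strs, loc):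
--     if any(len(s) <= loc for s in strs):
--         return [], ''
--     c = strs[0][loc]
--     if all(s[loc] == c for s in strs):
--         return list(range(len(strs))), c
--     return [], ''
-- ===== Notes on version B (the rewrite author's own statement) =====
-- stated objective: simpler
-- what changed: B drops A's count/index dictionaries entirely: it checks length and char-agreement with any/all scans and produces the index list as list(range(len(strs))) only on success.
import Mathlib
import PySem

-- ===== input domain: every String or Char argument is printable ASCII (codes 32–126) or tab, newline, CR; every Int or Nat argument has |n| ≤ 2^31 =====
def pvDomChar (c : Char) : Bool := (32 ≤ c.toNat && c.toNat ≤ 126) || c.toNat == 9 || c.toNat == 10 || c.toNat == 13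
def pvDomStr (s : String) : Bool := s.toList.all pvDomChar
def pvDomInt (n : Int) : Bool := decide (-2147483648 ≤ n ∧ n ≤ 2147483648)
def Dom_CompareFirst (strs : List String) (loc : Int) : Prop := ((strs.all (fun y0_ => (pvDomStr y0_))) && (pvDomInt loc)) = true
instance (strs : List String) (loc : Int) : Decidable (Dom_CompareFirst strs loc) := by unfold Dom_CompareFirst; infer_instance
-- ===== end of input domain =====

-- B replaces A's count/index dictionaries by an any/all scan and a range; equivalence is about the return value (neither mutates).

-- ===== PORT A =====
-- A's for-loop: outer none = IndexError inside the loop, some none = the early 'return [],""', some (some …) = loop completed.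
def CompareFirstLoop (loc : Int) :
    List (Int × String) → PySem.Dict Char Int → PySem.Dict Char (List Int) →
    Option (Option (PySem.Dict Char Int × PySem.Dict Char (List Int)))
  | [], count, index => some (some (count, index))
  | (si, s) :: rest, count, index =>
    if loc < PySem.Str.len s then
      match PySem.Str.pyGet? s loc with
      | none => none
      | some c =>
        if (count.get? c).isSome then
          CompareFirstLoop loc rest (count.modify c 0 (· + 1)) (index.modify c [] (· ++ [si]))
        else
          CompareFirstLoop loc rest (count.insert c 1) (index.insert c [si])
    else
      some none

def CompareFirst (strs : List String) (loc : Int) : List Int × String :=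
  match CompareFirstLoop loc (PySem.List.enumerate strs) PySem.Dict.empty PySem.Dict.empty with
  | none => ([], "")                  -- IndexError in the loop: outside Pre_
  | some none => ([], "")             -- early 'return [],""'
  | some (some (count, index)) =>
    match PySem.List.pyGet? strs 0 with
    | none => ([], "")                -- IndexError strs[0]: outside Pre_
    | some s0 =>
      match PySem.Str.pyGet? s0 loc with
      | none => ([], "")              -- IndexError strs[0][loc]: outside Pre_
      | some c =>
        match count.get? c with
        | none => ([], "")            -- KeyError: unreachable under Pre_
        | some n =>
          if n = PySem.List.len strs then
            match index.get? c with
            | none => ([], "")        -- KeyError: unreachable under Pre_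
            | some js => (js, String.ofList [c])
          else ([], "")

-- ===== PORT B =====
def CompareFirst_alt (strs : List String) (loc : Int) : List Int × String :=
  if strs.any (fun s => decide (PySem.Str.len s ≤ loc)) then ([], "")
  else
    match PySem.List.pyGet? strs 0 with
    | none => ([], "")                -- IndexError strs[0]: outside Pre_
    | some s0 =>
      match PySem.Str.pyGet? s0 loc with
      | none => ([], "")              -- IndexError strs[0][loc]: outside Pre_
      | some c =>
        if strs.all (fun s => PySem.Str.pyGet? s loc == some c) then
          (PySem.List.pyRange 0 (PySem.List.len strs) 1, String.ofList [c])
        else ([], "")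

-- ===== PRECONDITION & SPEC =====
-- Pre_ excludes exactly the inputs where A raises IndexError: the empty list (strs[0]), and a
-- negative loc with some string shorter than |loc| (s[loc] inside the loop).
def Pre_CompareFirst (strs : List String) (loc : Int) : Prop :=
  strs ≠ [] ∧ (0 ≤ loc ∨ ∀ s ∈ strs, 0 ≤ loc + PySem.Str.len s)
instance (strs : List String) (loc : Int) : Decidable (Pre_CompareFirst strs loc) := by
  unfold Pre_CompareFirst; infer_instance
def pvWitness_CompareFirst : List String × Int := (["ab", "ac"], 0)

def Spec_CompareFirst (strs : List String) (loc : Int) (out : List Int × String) : Prop := out = CompareFirst_alt strs loc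
instance (strs : List String) (loc : Int) (out : List Int × String) : Decidable (Spec_CompareFirst strs loc out) := by unfold Spec_CompareFirst; infer_instance

-- ===== CLAIM (what is proved, stated in full; the proofs are below) =====
def Claim_equal_CompareFirst : Prop := ∀ (strs : List String) (loc : Int), Dom_CompareFirst strs loc → Pre_CompareFirst strs loc → Spec_CompareFirst strs loc (CompareFirst strs loc)

-- ===== LEMMAS AND PROOFS =====

-- the character a string contributes (only used when pyGet? is a some)
def chrAt (loc : Int) (s : String) : Char := (PySem.Str.pyGet? s loc).getD 'a'

theorem loop_bad (loc : Int) (l : List (Int × String))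
    (h : ∃ p ∈ l, ¬ loc < PySem.Str.len p.2) (count : PySem.Dict Char Int)
    (index : PySem.Dict Char (List Int)) :
    CompareFirstLoop loc l count index = none ∨ CompareFirstLoop loc l count index = some none := by
  induction l generalizing count index with
  | nil => simp at h
  | cons p rest ih =>
    obtain ⟨si, s⟩ := p
    by_cases hs : loc < PySem.Str.len s
    · rcases h with ⟨q, hq, hql⟩
      rcases List.mem_cons.1 hq with rfl | hq'
      · exact absurd hs hql
      · simp only [CompareFirstLoop, if_pos hs]
        cases hg : PySem.Str.pyGet? s loc with
        | none => exact Or.inl rfl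
        | some c =>
          by_cases hc : (count.get? c).isSome
          · simp only [hc, if_true]; exact ih ⟨q, hq', hql⟩ _ _
          · simp only [hc]; exact ih ⟨q, hq', hql⟩ _ _
    · exact Or.inr (by simp only [CompareFirstLoop, if_neg hs])

theorem loop_fold (loc : Int) (l : List (Int × String))
    (h : ∀ p ∈ l, loc < PySem.Str.len p.2 ∧ (PySem.Str.pyGet? p.2 loc).isSome)
    (count : PySem.Dict Char Int) (index : PySem.Dict Char (List Int))
    (hsync : ∀ x, (count.get? x).isSome = (index.get? x).isSome) :
    CompareFirstLoop loc l count index =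
      some (some (l.foldl (fun d p => d.modify (chrAt loc p.2) 0 (· + 1)) count,
                  l.foldl (fun d p => d.modify (chrAt loc p.2) [] (· ++ [p.1])) index)) := by
  induction l generalizing count index with
  | nil => rfl
  | cons p rest ih =>
    obtain ⟨si, s⟩ := p
    obtain ⟨hs, hg⟩ := h (si, s) List.mem_cons_self
    obtain ⟨c, hc⟩ := Option.isSome_iff_exists.1 hg
    have hc2 : PySem.Str.pyGet? s loc = some c := hc
    have hchr : chrAt loc s = c := by unfold chrAt; rw [hc2]; rfl
    have hsync' : ∀ x, ((count.modify c 0 (· + 1)).get? x).isSome =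
        ((index.modify c [] (· ++ [si])).get? x).isSome := by
      intro x
      simp only [PySem.Dict.modify, PySem.Dict.get?_insert]
      by_cases hx : x = c <;> simp [hx, hsync x]
    simp only [CompareFirstLoop, if_pos hs, hc2, List.foldl_cons, hchr]
    by_cases hmem : (count.get? c).isSome
    · simp only [hmem, if_true]
      exact ih (fun q hq => h q (List.mem_cons_of_mem _ hq)) _ _ hsync'
    · have hnc : count.get? c = none := Option.not_isSome_iff_eq_none.1 hmem
      have hni : index.get? c = none := by
        have := hsync c; rw [hnc] at this; exact Option.not_isSome_iff_eq_none.1 (by simp [← this])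
      have h1 : count.insert c 1 = count.modify c 0 (· + 1) := by
        simp [PySem.Dict.modify, PySem.Dict.getD_eq_get?_getD, hnc]
      have h2 : index.insert c [si] = index.modify c [] (· ++ [si]) := by
        simp [PySem.Dict.modify, PySem.Dict.getD_eq_get?_getD, hni]
      simp only [hmem]
      rw [h1, h2]
      exact ih (fun q hq => h q (List.mem_cons_of_mem _ hq)) _ _ hsync'

-- every string long enough at loc (and, for negative loc, long enough from the end) indexes successfully
theorem pyGet?_isSome_of_bounds (s : String) (loc : Int)
    (h1 : loc < PySem.Str.len s) (h2 : 0 ≤ loc ∨ 0 ≤ loc + PySem.Str.len s) :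
    (PySem.Str.pyGet? s loc).isSome := by
  rw [Option.isSome_iff_ne_none]
  intro hn
  simp only [PySem.Str.len_eq] at h1 h2
  simp only [PySem.Str.pyGet?_eq, PySem.Chars.pyGet?_eq_listPyGet?,
    PySem.List.pyGet?_eq_none_iff, PySem.Raise.InRange] at hn
  omega

-- ===== VERDICT (by name: the statement is the Claim_ definition above) =====
theorem CompareFirst_spec : Claim_equal_CompareFirst := by
  intro strs loc _ hpre
  obtain ⟨hne, hrng⟩ := hpre
  unfold Spec_CompareFirst
  by_cases hbad : ∃ s ∈ strs, PySem.Str.len s ≤ loc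
  · -- some string is too short: A early-returns, B's any fires
    have hany : strs.any (fun s => decide (PySem.Str.len s ≤ loc)) = true := by
      obtain ⟨s, hs, hle⟩ := hbad
      exact List.any_eq_true.2 ⟨s, hs, by simpa using hle⟩
    have hB : CompareFirst_alt strs loc = ([], "") := by
      unfold CompareFirst_alt; rw [if_pos hany]
    have hpair : ∃ p ∈ PySem.List.enumerate strs, ¬ loc < PySem.Str.len p.2 := by
      obtain ⟨s, hs, hle⟩ := hbad
      have : s ∈ (PySem.List.enumerate strs).map (·.2) := by
        rw [PySem.List.map_snd_enumerate]; exact hs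
      obtain ⟨p, hp, hps⟩ := List.mem_map.1 this
      exact ⟨p, hp, by rw [hps]; omega⟩
    rcases loop_bad loc _ hpair PySem.Dict.empty PySem.Dict.empty with hl | hl <;>
      (unfold CompareFirst; rw [hl, hB])
  · push_neg at hbad
    have hsome : ∀ s ∈ strs, PySem.Str.pyGet? s loc = some (chrAt loc s) := by
      intro s hs
      have h2 : 0 ≤ loc ∨ 0 ≤ loc + PySem.Str.len s := by
        rcases hrng with h | h
        · exact Or.inl h
        · exact Or.inr (h s hs)
      have := pyGet?_isSome_of_bounds s loc (hbad s hs) h2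
      obtain ⟨c, hc⟩ := Option.isSome_iff_exists.1 this
      have hc' : PySem.List.pyGet? s.toList loc = some c := by simpa using hc
      rw [hc]; simp [chrAt, hc']
    have hmemsnd : ∀ p ∈ PySem.List.enumerate strs, p.2 ∈ strs := by
      intro p hp
      rw [← PySem.List.map_snd_enumerate (xs := strs) (s := 0)]
      exact List.mem_map_of_mem hp
    have hgood : ∀ p ∈ PySem.List.enumerate strs,
        loc < PySem.Str.len p.2 ∧ (PySem.Str.pyGet? p.2 loc).isSome := by
      intro p hp
      exact ⟨hbad p.2 (hmemsnd p hp), by rw [hsome p.2 (hmemsnd p hp)]; rfl⟩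
    have hloop := loop_fold loc (PySem.List.enumerate strs) hgood PySem.Dict.empty
      PySem.Dict.empty (by intro x; simp [PySem.Dict.get?_empty])
    obtain ⟨s0, rest, hs0⟩ : ∃ s0 rest, strs = s0 :: rest := by
      cases strs with
      | nil => exact absurd rfl hne
      | cons a l => exact ⟨a, l, rfl⟩
    have hmem0 : s0 ∈ strs := hs0 ▸ List.mem_cons_self
    have hget0 : PySem.List.pyGet? strs 0 = some s0 := by
      rw [hs0]; exact PySem.List.pyGet?_zero_cons _ _
    set c0 := chrAt loc s0 with hc0
    set cfold : PySem.Dict Char Int := (PySem.List.enumerate strs).foldl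
      (fun d p => d.modify (chrAt loc p.2) 0 (· + 1)) PySem.Dict.empty with hcf
    set ifold : PySem.Dict Char (List Int) := (PySem.List.enumerate strs).foldl
      (fun d p => d.modify (chrAt loc p.2) [] (· ++ [p.1])) PySem.Dict.empty with hif
    -- the counted value at c0
    have hcgetD : cfold.getD c0 0 = ((strs.map (chrAt loc)).count c0 : Int) := by
      have : cfold = ((PySem.List.enumerate strs).map (fun p => chrAt loc p.2)).foldl
          (fun d x => d.modify x 0 (· + 1)) PySem.Dict.empty := by
        rw [List.foldl_map]
      rw [this, PySem.Dict.getD_foldl_modify_add_one]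
      have hm : (PySem.List.enumerate strs).map (fun p => chrAt loc p.2)
          = strs.map (chrAt loc) := by
        rw [show (fun (p : Int × String) => chrAt loc p.2) = (chrAt loc) ∘ (·.2) from rfl,
          ← List.map_map, PySem.List.map_snd_enumerate]
      rw [hm, PySem.Dict.getD_empty]
      omega
    have higetD : ifold.getD c0 [] =
        (((PySem.List.enumerate strs).map (fun p => (chrAt loc p.2, p.1))).filter
          (fun q => q.1 == c0)).map (·.2) := by
      have : ifold = ((PySem.List.enumerate strs).map (fun p => (chrAt loc p.2, p.1))).foldl
          (fun d q => d.modify q.1 [] (· ++ [q.2])) PySem.Dict.empty := by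
        rw [List.foldl_map]
      rw [this, PySem.Dict.getD_foldl_modify_append, PySem.Dict.getD_empty, List.nil_append]
    have hanyB : (strs.any (fun s => decide (PySem.Str.len s ≤ loc))) = false := by
      simp only [List.any_eq_false, decide_eq_true_eq]
      intro s hs
      exact not_le.2 (hbad s hs)
    unfold CompareFirst
    rw [hloop, hget0]
    dsimp only
    rw [hsome s0 hmem0, ← hc0]
    unfold CompareFirst_alt
    rw [if_neg (by rw [hanyB]; simp), hget0]
    dsimp only
    rw [hsome s0 hmem0, ← hc0]
    by_cases hall : ∀ s ∈ strs, chrAt loc s = c0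
    · -- all strings share the char: A returns its index list, B the range
      have hcount : (strs.map (chrAt loc)).count c0 = strs.length := by
        have h1 : (strs.map (chrAt loc)).count c0 = (strs.map (chrAt loc)).length :=
          List.count_eq_length.2 (fun b hb => by
            obtain ⟨t, ht, rfl⟩ := List.mem_map.1 hb
            exact (hall t ht).symm)
        rw [h1, List.length_map]
      have hcget : cfold.get? c0 = some ((strs.length : Int)) := by
        cases hq : cfold.get? c0 with
        | none =>
          have := hcgetD
          rw [PySem.Dict.getD_eq_get?_getD, hq, hcount] at this
          rw [hs0] at this
          simp only [Option.getD_none, List.length_cons] at this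
          omega
        | some n =>
          have := hcgetD
          rw [PySem.Dict.getD_eq_get?_getD, hq, hcount] at this
          simp only [Option.getD_some] at this
          rw [this]
      rw [hcget]
      dsimp only
      rw [if_pos (by rw [PySem.List.len_eq])]
      have hfilter : ((PySem.List.enumerate strs).map (fun p => (chrAt loc p.2, p.1))).filter
          (fun q => q.1 == c0) = (PySem.List.enumerate strs).map (fun p => (chrAt loc p.2, p.1)) := by
        refine List.filter_eq_self.2 ?_
        intro q hq
        obtain ⟨p, hp, rfl⟩ := List.mem_map.1 hq
        simpa using hall p.2 (hmemsnd p hp)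
      have hjs : ifold.getD c0 [] = PySem.List.pyRange 0 (strs.length : Int) 1 := by
        rw [higetD, hfilter, List.map_map]
        rw [show ((·.2 : Char × Int → Int) ∘ fun p : Int × String => (chrAt loc p.2, p.1))
          = (·.1) from rfl]
        rw [PySem.List.map_fst_enumerate]
        norm_num
      have higet : ifold.get? c0 = some (PySem.List.pyRange 0 (strs.length : Int) 1) := by
        cases hq : ifold.get? c0 with
        | none =>
          have := hjs
          rw [PySem.Dict.getD_eq_get?_getD, hq] at this
          simp only [Option.getD_none] at this
          have h0 : (0 : Int) ∈ PySem.List.pyRange 0 (strs.length : Int) 1 := by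
            rw [PySem.List.mem_pyRange_one]
            constructor
            · omega
            · rw [hs0]; simp
          rw [← this] at h0
          simp at h0
        | some js =>
          have := hjs
          rw [PySem.Dict.getD_eq_get?_getD, hq] at this
          simp only [Option.getD_some] at this
          rw [this]
      rw [higet]
      dsimp only
      rw [if_pos (by
        simp only [List.all_eq_true]
        intro s hs
        rw [hsome s hs, hall s hs]
        exact beq_self_eq_true _)]
      rw [PySem.List.len_eq]
    · -- some string differs: both return ([], "")
      push_neg at hall
      obtain ⟨t, ht, htne⟩ := hall
      have hcount : (strs.map (chrAt loc)).count c0 ≠ strs.length := by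
        intro hcnt
        rw [show strs.length = (strs.map (chrAt loc)).length by rw [List.length_map]] at hcnt
        have := List.count_eq_length.1 hcnt (chrAt loc t) (List.mem_map_of_mem ht)
        exact htne this.symm
      have hne' : ∀ n, cfold.get? c0 = some n → n ≠ (PySem.List.len strs) := by
        intro n hq hn
        have := hcgetD
        rw [PySem.Dict.getD_eq_get?_getD, hq] at this
        simp only [Option.getD_some] at this
        rw [PySem.List.len_eq] at hn
        apply hcount
        omega
      have hBfalse : ¬ (strs.all (fun s => PySem.Str.pyGet? s loc == some c0) = true) := by
        simp only [List.all_eq_true, not_forall]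
        refine ⟨t, ht, ?_⟩
        rw [hsome t ht]
        simp [htne]
      dsimp only
      rw [if_neg hBfalse]
      cases hq : cfold.get? c0 with
      | none => rfl
      | some n =>
        dsimp only
        rw [if_neg (hne' n hq)]
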